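-- pv_equiv track=rewrite | github.com/pypi-data/pypi-mirror-211 | packages/jina-now/jina-now-0.0.53.dev47.tar.gz/jina-now-0.0.53.dev47/now/data_loading/data_loading.py | validate_shrink_data
-- ===== SOURCE A (Python) =====
-- from collections import Counter, defaultdict
--
-- def validate_shrink_data(file_paths):
--     """
--     Validates the file paths: Keeps only consistent folders based on the number of files inside them.
--
--     :param file_paths: The initial file paths.
--
--     :return: The file paths to keep.
--     """
--     dict_fp = defaultdict(int)
--     # take the folders of the files
--     for file_path in file_paths:
--         dict_fp['/'.join(file_path.split('/')[:-1])] += 1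
--
--     # remove the keys that don't have the same length as the majority
--     val_counts = Counter(dict_fp.values())
--     max_occ = max(list(val_counts.values()))
--     max_common_element = 0
--     for key, value in val_counts.items():
--         if value == max_occ:
--             max_common_element = max(max_common_element, key)
--     keys_to_remove = []
--     for key, val in dict_fp.items():
--         if val != max_common_element:
--             keys_to_remove.append(key)
--
--     # keep only the desired file paths
--     files_to_keep = []
--     for file_path in file_paths:
--         keep = True
--         for key in keys_to_remove:
--             if file_path.startswith(key):
--                 keep = False
--                 break
--         if keep:
--             files_to_keep.append(file_path)
--
--     return files_to_keep
-- ===== SOURCE B (Python) =====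
-- def validate_shrink_data(file_paths):
--     """
--     Validates the file paths: Keeps only consistent folders based on the number of files inside them.
--
--     :param file_paths: The initial file paths.
--
--     :return: The file paths to keep.
--     """
--     folders = ['/'.join(fp.split('/')[:-1]) for fp in file_paths]
--     distinct = list(dict.fromkeys(folders))
--     counts = [folders.count(f) for f in distinct]
--     # the majority file-count: one max by the tuple (how many folders share the count, the count)
--     target = max(counts, key=lambda c: (counts.count(c), c))
--     # character trie of the off-count folder strings; None marks the end of a stored folder
--     root = {}
--     for f, c in zip(distinct, counts):
--         if c != target:
--             node = root
--             for ch in f: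
--                 node = node.setdefault(ch, {})
--             node[None] = True
--     def dropped(fp):
--         node = root
--         if None in node:
--             return True
--         for ch in fp:
--             if ch not in node:
--                 return False
--             node = node[ch]
--             if None in node:
--                 return True
--         return False
--     return [fp for fp in file_paths if not dropped(fp)]
-- ===== Notes on version B (the rewrite author's own statement) =====
-- stated objective: alternative
-- what changed: B drops A's defaultdict/Counter machinery for an ordered dedup with per-folder list.count and a single max keyed by the tuple (frequency of the count, the count), and replaces A's per-file linear startswith scan over every removed folder key by one walk per file path through a character trie built once from the off-count folders.
import Mathlib
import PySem

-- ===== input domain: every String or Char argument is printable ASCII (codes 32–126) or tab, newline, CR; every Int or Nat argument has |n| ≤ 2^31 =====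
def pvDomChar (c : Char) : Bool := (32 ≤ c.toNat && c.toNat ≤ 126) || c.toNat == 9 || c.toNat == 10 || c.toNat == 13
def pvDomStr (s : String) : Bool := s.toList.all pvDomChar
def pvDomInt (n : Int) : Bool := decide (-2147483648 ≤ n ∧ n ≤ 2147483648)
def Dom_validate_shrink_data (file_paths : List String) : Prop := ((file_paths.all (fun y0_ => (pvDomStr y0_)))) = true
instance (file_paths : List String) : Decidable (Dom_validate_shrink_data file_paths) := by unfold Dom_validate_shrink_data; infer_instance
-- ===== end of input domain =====

-- B: no dicts/Counters — an ordered dedup with per-folder list.count and ONE max by the tuple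
-- (frequency of the count, the count) replace A's defaultdict + Counter + two-scan majority search,
-- and a character trie of the off-count folders, walked once per file path, replaces A's per-file
-- linear scan over every removed folder key with startswith.

-- ===== PORT A =====

-- '/'.join(file_path.split('/')[:-1])  (the folder of a file; the sep '/' is nonempty, so split? never returns none)
def pvDirname (fp : String) : String :=
  PySem.Str.join "/" (PySem.List.slice ((PySem.Str.split? fp "/").getD []) none (some (-1)))

def validate_shrink_data (file_paths : List String) : List String :=
  -- dict_fp = defaultdict(int); for file_path: dict_fp[folder] += 1
  let dict_fp : PySem.Dict String Int :=
    file_paths.foldl (fun d fp => d.modify (pvDirname fp) 0 (· + 1)) PySem.Dict.empty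
  -- val_counts = Counter(dict_fp.values())
  let val_counts : PySem.Dict Int Int :=
    dict_fp.values.foldl (fun d v => d.modify v 0 (· + 1)) PySem.Dict.empty
  -- max_occ = max(list(val_counts.values()))  (ValueError on the empty list: excluded by Pre_)
  let max_occ : Int := (PySem.List.max? val_counts.values (fun x => x)).getD 0
  -- for key, value in val_counts.items(): if value == max_occ: mce = max(mce, key)
  let max_common_element : Int :=
    val_counts.items.foldl (fun m kv => if kv.2 == max_occ then max m kv.1 else m) 0
  -- keys_to_remove
  let keys_to_remove : List String :=
    dict_fp.items.foldl (fun acc kv => if kv.2 != max_common_element then acc ++ [kv.1] else acc) []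
  -- files_to_keep (the inner for-with-break over keys_to_remove is the 'any')
  file_paths.foldl (fun acc fp =>
    let keep := !(keys_to_remove.any (fun key => PySem.Str.startswith fp key))
    if keep then acc ++ [fp] else acc) []

-- ===== PORT B =====

-- the nested-dict trie of Source B: a node is (terminal flag, children); children are an assoc list
-- in insertion order (a mutual pair, as required instead of a nested inductive)
mutual
inductive PTrie where
  | node : Bool → PTrieChildren → PTrie
inductive PTrieChildren where
  | nil : PTrieChildren
  | cons : Char → PTrie → PTrieChildren → PTrieChildren
end

-- children lookup ('ch in node' / 'node[ch]')
def childFind : PTrieChildren → Char → Option PTrie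
  | .nil, _ => none
  | .cons c' t rest, c => if c' = c then some t else childFind rest c

-- replace the child at c in place, or append it (the insertion behaviour of dict.setdefault)
def childSet : PTrieChildren → Char → PTrie → PTrieChildren
  | .nil, c, t => .cons c t .nil
  | .cons c' t' rest, c, t => if c' = c then .cons c' t rest else .cons c' t' (childSet rest c t)

-- 'node = root; for ch in f: node = node.setdefault(ch, {}); node[None] = True'
def trieInsert : PTrie → List Char → PTrie
  | .node _ ch, [] => .node true ch
  | .node b ch, c :: cs =>
      .node b (childSet ch c (trieInsert ((childFind ch c).getD (.node false .nil)) cs))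

-- the 'dropped' walk: terminal reached → True; missing child → False
def trieMatch : PTrie → List Char → Bool
  | .node b _, [] => b
  | .node b ch, c :: cs =>
      b || ((childFind ch c).map (fun t => trieMatch t cs)).getD false

def validate_shrink_data_alt (file_paths : List String) : List String :=
  let folders := file_paths.map pvDirname
  -- distinct = list(dict.fromkeys(folders)); counts = [folders.count(f) for f in distinct]
  let distinct := PySem.List.dedup folders
  let counts : List Int := distinct.map (fun f => (PySem.List.count folders f : Int))
  -- target = max(counts, key=lambda c: (counts.count(c), c))  (ValueError on []: excluded by Pre_)
  let target : Int :=
    (PySem.List.max2? counts (fun c => (PySem.List.count counts c : Int)) (fun c => c)).getD 0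
  -- build the trie of the off-count folders
  let root := (distinct.zip counts).foldl
      (fun t p => if p.2 != target then trieInsert t p.1.toList else t) (PTrie.node false .nil)
  file_paths.filter (fun fp => !trieMatch root fp.toList)

-- ===== PRECONDITION & SPEC =====
-- A (and B) raise ValueError (max() of an empty sequence) on the empty list; nothing else is excluded.
def Pre_validate_shrink_data (file_paths : List String) : Prop := file_paths ≠ []
instance (file_paths : List String) : Decidable (Pre_validate_shrink_data file_paths) := by unfold Pre_validate_shrink_data; infer_instance
def pvWitness_validate_shrink_data : List String := ["a/x", "a/y", "b/z"]

def Spec_validate_shrink_data (file_paths : List String) (out : List String) : Prop := out = validate_shrink_data_alt file_paths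
instance (file_paths : List String) (out : List String) : Decidable (Spec_validate_shrink_data file_paths out) := by unfold Spec_validate_shrink_data; infer_instance

-- ===== CLAIM (what is proved, stated in full; the proofs are below) =====
def Claim_equal_validate_shrink_data : Prop := ∀ (file_paths : List String), Dom_validate_shrink_data file_paths → Pre_validate_shrink_data file_paths → Spec_validate_shrink_data file_paths (validate_shrink_data file_paths)

-- ===== LEMMAS AND PROOFS =====

-- one step of the fold inside PySem.List.max2? (second key = identity, on Int)
theorem pv_max2_cons (k1 : Int → Int) (a x : Int) (t : List Int) :
    PySem.List.max2? (a :: x :: t) k1 (fun c => c)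
    = PySem.List.max2?
        ((if (decide (k1 a < k1 x) || !decide (k1 x < k1 a) && decide (a < x)) = true then x else a)
          :: t) k1 (fun c => c) := by
  by_cases h : (decide (k1 a < k1 x) || !decide (k1 x < k1 a) && decide (a < x)) = true <;>
    simp only [PySem.List.max2?, List.foldl_cons, h, if_pos, if_neg, Bool.false_eq_true,
      not_false_eq_true]

-- PySem.List.max2? (with second key = identity, on Int) returns the lexicographically
-- (key, element)-largest element, the element itself breaking key ties
theorem pv_fold2_spec (k1 : Int → Int) (xs : List Int) : ∀ (a : Int),
    ∃ m, PySem.List.max2? (a :: xs) k1 (fun c => c) = some m ∧ m ∈ a :: xs ∧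
      ∀ y ∈ a :: xs, k1 y < k1 m ∨ (k1 y = k1 m ∧ y ≤ m) := by
  induction xs with
  | nil =>
      intro a
      refine ⟨a, rfl, List.mem_singleton.mpr rfl, ?_⟩
      intro y hy
      rw [List.mem_singleton] at hy
      subst hy
      exact Or.inr ⟨rfl, le_refl _⟩
  | cons x t ih =>
      intro a
      rw [pv_max2_cons]
      by_cases h : (decide (k1 a < k1 x) || !decide (k1 x < k1 a) && decide (a < x)) = true
      · rw [if_pos h]
        obtain ⟨m, hm, hmem, hmax⟩ := ih x
        refine ⟨m, hm, ?_, ?_⟩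
        · rcases List.mem_cons.mp hmem with rfl | h1
          · exact List.mem_cons_of_mem _ List.mem_cons_self
          · exact List.mem_cons_of_mem _ (List.mem_cons_of_mem _ h1)
        · intro y hy
          have hax : k1 a < k1 x ∨ (k1 a = k1 x ∧ a ≤ x) := by
            simp only [Bool.or_eq_true, Bool.and_eq_true, Bool.not_eq_true', decide_eq_true_eq,
              decide_eq_false_iff_not] at h
            rcases h with h | ⟨h1, h2⟩
            · exact Or.inl h
            · omega
          have hxm : k1 x < k1 m ∨ (k1 x = k1 m ∧ x ≤ m) := hmax x List.mem_cons_self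
          rcases List.mem_cons.mp hy with rfl | hy
          · rcases hax with h1 | h1 <;> rcases hxm with h2 | h2 <;> omega
          · exact hmax y hy
      · rw [if_neg h]
        obtain ⟨m, hm, hmem, hmax⟩ := ih a
        refine ⟨m, hm, ?_, ?_⟩
        · rcases List.mem_cons.mp hmem with rfl | h1
          · exact List.mem_cons_self
          · exact List.mem_cons_of_mem _ (List.mem_cons_of_mem _ h1)
        · intro y hy
          have hxa : k1 x < k1 a ∨ (k1 x = k1 a ∧ x ≤ a) := by
            simp only [Bool.or_eq_true, Bool.and_eq_true, Bool.not_eq_true', decide_eq_true_eq,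
              decide_eq_false_iff_not, not_or, not_and] at h
            omega
          have ham : k1 a < k1 m ∨ (k1 a = k1 m ∧ a ≤ m) := hmax a List.mem_cons_self
          rcases List.mem_cons.mp hy with rfl | hy
          · exact ham
          · rcases List.mem_cons.mp hy with rfl | hy
            · rcases hxa with h1 | h1 <;> rcases ham with h2 | h2 <;> omega
            · exact hmax y (List.mem_cons_of_mem _ hy)

-- max2? with identity second key depends only on which Ints are in the list
theorem pv_max2_eq_of_mem_iff (k1 : Int → Int) (xs ys : List Int) (hx : xs ≠ []) (hy : ys ≠ [])
    (h : ∀ z : Int, z ∈ xs ↔ z ∈ ys) :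
    PySem.List.max2? xs k1 (fun c => c) = PySem.List.max2? ys k1 (fun c => c) := by
  obtain ⟨a, xt, rfl⟩ := List.exists_cons_of_ne_nil hx
  obtain ⟨b, yt, rfl⟩ := List.exists_cons_of_ne_nil hy
  obtain ⟨m1, hm1, hmem1, hmax1⟩ := pv_fold2_spec k1 xt a
  obtain ⟨m2, hm2, hmem2, hmax2⟩ := pv_fold2_spec k1 yt b
  rw [hm1, hm2]
  have h12 := hmax2 m1 ((h m1).mp hmem1)
  have h21 := hmax1 m2 ((h m2).mpr hmem2)
  have : m1 = m2 := by rcases h12 with h1 | h1 <;> rcases h21 with h2 | h2 <;> omega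
  rw [this]

-- every value of Counter(xs) is at least 1
theorem pv_counter_values_pos {κ : Type} [BEq κ] [LawfulBEq κ] (xs : List κ) :
    ∀ v ∈ (PySem.Dict.counter xs).values, 1 ≤ v := by
  intro v hv
  rw [PySem.Dict.values_eq_map_keys _ (PySem.Dict.nodup_keys_counter xs) 0] at hv
  obtain ⟨k, hk, rfl⟩ := List.mem_map.mp hv
  rw [PySem.Dict.keys_counter, PySem.Set.mem_ofList] at hk
  rw [PySem.Dict.getD_counter]
  have := List.count_pos_iff.mpr hk
  omega

-- Counter(xs) of a nonempty xs has a nonempty keys list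
theorem pv_counter_keys_ne_nil {κ : Type} [BEq κ] [LawfulBEq κ] (xs : List κ) (h : xs ≠ []) :
    (PySem.Dict.counter xs).keys ≠ [] := by
  cases xs with
  | nil => exact absurd rfl h
  | cons x t =>
      intro hk
      have hx : x ∈ PySem.Set.ofList (x :: t) := (PySem.Set.mem_ofList _ _).mpr List.mem_cons_self
      rw [← PySem.Dict.keys_counter, hk] at hx
      exact (List.not_mem_nil).elim hx

-- Counter(xs) of a nonempty xs has a nonempty values list
theorem pv_counter_values_ne_nil {κ : Type} [BEq κ] [LawfulBEq κ] (xs : List κ) (h : xs ≠ []) :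
    (PySem.Dict.counter xs).values ≠ [] := by
  intro hv
  apply pv_counter_keys_ne_nil xs h
  have h1 : (PySem.Dict.counter xs).keys.length = (PySem.Dict.counter xs).values.length := by
    simp only [PySem.Dict.keys, PySem.Dict.values, List.length_map]
  rw [hv, List.length_nil] at h1
  exact List.eq_nil_of_length_eq_zero h1

-- A's two-scan majority count (max occurrence, then largest count with that occurrence)
-- equals the single lexicographic max by (occurrence, count) over the distinct counts
theorem pv_target_eq (vals : List Int) (hne : vals ≠ []) (hpos : ∀ v ∈ vals, 1 ≤ v) :
    (PySem.Dict.counter vals).items.foldl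
      (fun m kv => if kv.2 == (PySem.List.max? (PySem.Dict.counter vals).values (fun x => x)).getD 0
                   then max m kv.1 else m) 0
    = (PySem.List.max2? (PySem.Dict.counter vals).keys
        (fun c => (PySem.Dict.counter vals).getD c 0) (fun c => c)).getD 0 := by
  have hK := PySem.Dict.nodup_keys_counter vals
  set vc := PySem.Dict.counter vals with hvc
  have hvalues : vc.values = vc.keys.map (fun c => vc.getD c 0) :=
    PySem.Dict.values_eq_map_keys vc hK 0
  obtain ⟨mo, hmo⟩ : ∃ mo, PySem.List.max? vc.values (fun x => x) = some mo := by
    cases hmx : PySem.List.max? vc.values (fun x => x) with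
    | none =>
        exact absurd ((PySem.List.max?_eq_none_iff _ _).mp hmx) (pv_counter_values_ne_nil vals hne)
    | some mo => exact ⟨mo, rfl⟩
  have hmo_mem : mo ∈ vc.values := PySem.List.max?_mem hmo
  have hmo_max : ∀ v ∈ vc.values, v ≤ mo := PySem.List.max?_isMax hmo
  rw [hmo]
  simp only [Option.getD_some]
  obtain ⟨c0, kt, hkeys⟩ : ∃ c0 kt, vc.keys = c0 :: kt := by
    cases hkc : vc.keys with
    | nil => exact absurd hkc (pv_counter_keys_ne_nil vals hne)
    | cons c0 kt => exact ⟨c0, kt, rfl⟩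
  obtain ⟨tgt, htgt, htmem, htmax⟩ := pv_fold2_spec (fun c => vc.getD c 0) kt c0
  rw [← hkeys] at htgt htmem htmax
  rw [htgt]
  simp only [Option.getD_some]
  have hitems : vc.items = vc.keys.map (fun k => (k, vc.getD k 0)) :=
    PySem.Dict.items_eq_map_keys vc hK 0
  rw [hitems, List.foldl_map]
  show List.foldl (fun m k => if (vc.getD k 0 == mo) = true then max m k else m) 0 vc.keys = tgt
  rw [PySem.List.foldl_if_eq_foldl_filter (fun k => vc.getD k 0 == mo) (fun m k => max m k)]
  set S := vc.keys.filter (fun k => vc.getD k 0 == mo) with hS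
  have hfoldS : S.foldl (fun m k => max m k) 0 = S.foldl max 0 := rfl
  rw [hfoldS]
  have htle : vc.getD tgt 0 ≤ mo := by
    apply hmo_max
    rw [hvalues]
    exact List.mem_map_of_mem htmem
  have htocc : vc.getD tgt 0 = mo := by
    rw [hvalues] at hmo_mem
    obtain ⟨c1, hc1, hc1e⟩ := List.mem_map.mp hmo_mem
    rcases htmax c1 hc1 with h1 | h1 <;> omega
  have htS : tgt ∈ S := by
    rw [hS, List.mem_filter]
    exact ⟨htmem, by simp [htocc]⟩
  have h1 : tgt ≤ S.foldl max 0 := (PySem.List.le_foldl_max S 0).2 tgt htS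
  have h2 : S.foldl max 0 ≤ tgt := by
    rcases PySem.List.foldl_max_mem S 0 with h0 | hmem
    · have : tgt ∈ vals := by
        have := htmem
        rw [PySem.Dict.keys_counter, PySem.Set.mem_ofList] at this
        exact this
      have := hpos tgt this
      omega
    · rw [hS, List.mem_filter] at hmem
      obtain ⟨hmemk, hocc⟩ := hmem
      rcases htmax _ hmemk with h3 | h3
      · rw [beq_iff_eq] at hocc
        omega
      · exact h3.2
  omega

-- trie lemmas ---------------------------------------------------------------

theorem childFind_childSet : ∀ (ch : PTrieChildren) (c : Char) (t : PTrie) (c' : Char),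
    childFind (childSet ch c t) c' = if c' = c then some t else childFind ch c'
  | .nil, c, t, c' => by
      simp only [childSet, childFind]
      by_cases h : c' = c
      · subst h
        rfl
      · rw [if_neg (fun hh : c = c' => h hh.symm), if_neg h]
  | .cons c0 t0 rest, c, t, c' => by
      simp only [childSet]
      by_cases h0 : c0 = c
      · subst h0
        rw [if_pos rfl]
        simp only [childFind]
        by_cases h' : c' = c0
        · subst h'
          rw [if_pos rfl, if_pos rfl]
        · rw [if_neg (fun hh : c0 = c' => h' hh.symm), if_neg h',
            if_neg (fun hh : c0 = c' => h' hh.symm)]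
      · rw [if_neg h0]
        simp only [childFind, childFind_childSet rest c t c']
        by_cases hc : c' = c
        · subst hc
          rw [if_neg (fun hh : c0 = c' => h0 hh), if_neg (fun hh : c0 = c' => h0 hh)]
        · rw [if_neg hc, if_neg hc]

theorem trieMatch_emptyNode (w : List Char) : trieMatch (.node false .nil) w = false := by
  cases w <;> simp [trieMatch, childFind]

-- inserting a string s into the trie adds exactly the walks of which s is a prefix
theorem trieMatch_insert (s : List Char) : ∀ (t : PTrie) (w : List Char),
    trieMatch (trieInsert t s) w = (s.isPrefixOf w || trieMatch t w) := by
  induction s with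
  | nil =>
      intro t w
      obtain ⟨b, ch⟩ := t
      cases w <;> simp [trieInsert, trieMatch, List.isPrefixOf]
  | cons c cs ih =>
      intro t w
      obtain ⟨b, ch⟩ := t
      cases w with
      | nil => simp [trieInsert, trieMatch, List.isPrefixOf]
      | cons c' cs' =>
          simp only [trieInsert, trieMatch, childFind_childSet, List.isPrefixOf]
          by_cases h : c' = c
          · subst h
            rw [if_pos rfl]
            simp only [Option.map_some, Option.getD_some, ih]
            cases hf : childFind ch c' with
            | none =>
                simp only [Option.map_none, Option.getD, trieMatch_emptyNode,
                  beq_self_eq_true, Bool.true_and]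
                cases List.isPrefixOf cs cs' <;> cases b <;> rfl
            | some t' =>
                simp only [Option.getD_some, Option.map_some, beq_self_eq_true, Bool.true_and]
                cases List.isPrefixOf cs cs' <;> cases b <;> cases trieMatch t' cs' <;> rfl
          · rw [if_neg h]
            have hbe : (c == c') = false := beq_eq_false_iff_ne.mpr (fun hh => h hh.symm)
            rw [hbe]
            simp

-- folding trieInsert over the kept pairs matches exactly the paths one of them prefixes
theorem trieMatch_foldl (pred : String × Int → Bool) (l : List (String × Int)) :
    ∀ (t0 : PTrie) (w : List Char),
    trieMatch (l.foldl (fun t p => if pred p then trieInsert t p.1.toList else t) t0) w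
      = (trieMatch t0 w || (l.filter pred).any (fun p => p.1.toList.isPrefixOf w)) := by
  induction l with
  | nil => intro t0 w; simp
  | cons a l ih =>
      intro t0 w
      simp only [List.foldl_cons, List.filter_cons]
      by_cases h : pred a
      · rw [if_pos h, if_pos h, ih, trieMatch_insert]
        simp only [List.any_cons]
        cases trieMatch t0 w <;> cases List.isPrefixOf a.1.toList w <;> simp
      · rw [if_neg h, if_neg h, ih]

-- zip of a list with a map over itself
theorem pv_zip_map_self {α β : Type} (g : α → β) (l : List α) :
    l.zip (l.map g) = l.map (fun a => (a, g a)) := by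
  induction l with
  | nil => rfl
  | cons a l ih => simp [ih]

-- ===== VERDICT (by name: the statement is the Claim_ definition above) =====
theorem validate_shrink_data_spec : Claim_equal_validate_shrink_data := by
  intro fps _ hpre
  show validate_shrink_data fps = validate_shrink_data_alt fps
  have hfolders : fps.map pvDirname ≠ [] := fun h => hpre (List.map_eq_nil_iff.mp h)
  simp only [validate_shrink_data, validate_shrink_data_alt]
  rw [← List.foldl_map (f := pvDirname)
        (g := fun d x => PySem.Dict.modify d x 0 (· + 1)) (l := fps)]
  rw [← PySem.Dict.counter_eq_foldl, ← PySem.Dict.counter_eq_foldl]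
  set folders := fps.map pvDirname with hfo
  set d := PySem.Dict.counter folders with hd
  set vc := PySem.Dict.counter d.values with hvcdef
  -- A's majority count as a lexicographic max over the distinct counts
  rw [pv_target_eq d.values (pv_counter_values_ne_nil _ hfolders) (pv_counter_values_pos _),
    ← hvcdef]
  -- B's dedup is the counter's key list
  rw [PySem.List.dedup_eq_ofList, ← PySem.Dict.keys_counter folders, ← hd]
  -- B's zipped (folder, count) pairs are the counter's items
  rw [pv_zip_map_self]
  have hpairs : d.keys.map (fun f => (f, (PySem.List.count folders f : Int))) = d.items := by
    rw [PySem.Dict.items_eq_map_keys d (PySem.Dict.nodup_keys_counter _) 0]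
    apply List.map_congr_left
    intro k _
    rw [PySem.Dict.getD_counter, PySem.List.count_eq]
  rw [hpairs]
  -- B's count list is the counter's value list
  have hcounts : d.keys.map (fun f => (PySem.List.count folders f : Int)) = d.values := by
    rw [PySem.Dict.values_eq_map_keys d (PySem.Dict.nodup_keys_counter _) 0]
    apply List.map_congr_left
    intro k _
    rw [PySem.Dict.getD_counter, PySem.List.count_eq]
  rw [hcounts]
  -- the two targets agree: same key, lists with the same Int members
  have htarget :
      PySem.List.max2? d.values (fun c => (PySem.List.count d.values c : Int)) (fun c => c)
        = PySem.List.max2? vc.keys (fun c => vc.getD c 0) (fun c => c) := by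
    have hkey : (fun c : Int => vc.getD c 0) = fun c => (PySem.List.count d.values c : Int) := by
      funext c
      rw [hvcdef, PySem.Dict.getD_counter, PySem.List.count_eq]
    rw [hkey]
    apply pv_max2_eq_of_mem_iff _ _ _ (pv_counter_values_ne_nil _ hfolders)
      (pv_counter_keys_ne_nil _ (pv_counter_values_ne_nil _ hfolders))
    intro z
    rw [PySem.Dict.keys_counter, PySem.Set.mem_ofList]
  rw [← htarget]
  set T := (PySem.List.max2? d.values (fun c => (PySem.List.count d.values c : Int))
    (fun c => c)).getD 0 with hT
  -- A's keys_to_remove and files_to_keep loops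
  rw [PySem.List.foldl_append_if (fun kv => kv.2 != T) (fun kv => kv.1) d.items [],
    List.nil_append,
    PySem.List.foldl_append_if_eq_filter
      (fun fp => !((List.filter (fun kv => kv.2 != T) d.items).map (fun kv => kv.1)).any
        (fun key => PySem.Str.startswith fp key)) fps [], List.nil_append]
  -- pointwise: the startswith scan over the removed keys is the trie walk
  apply List.filter_congr
  intro fp _
  rw [trieMatch_foldl, trieMatch_emptyNode, Bool.false_or, List.any_map]
  congr 1
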